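-- pv_equiv track=rewrite | github.com/maneshreyash/Bigram-Probabilities-and-Transformation-Based-POS-Tagging- | Ques3.py | tag_counter
-- ===== SOURCE A (Python) =====
-- def tag_counter(tags):
--     data = {}
--     for token in tags:
--         if token[0] not in data:
--             tag_map = {}
--             tag_map[token[1]] = 1
--             data[token[0]] = tag_map
--         else:
--             tag_map = data.get(token[0])
--             if token[1] in tag_map:
--                 tag_map[token[1]] += 1
--             else:
--                 tag_map[token[1]] = 1
--             data[token[0]] = tag_map
--     return data
-- ===== SOURCE B (Python) =====
-- def _count(ts):
--     counts = {}
--     for t in ts: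
--         counts[t] = counts.get(t, 0) + 1
--     return counts
--
--
-- def tag_counter(tags):
--     # pass 1: group tags by word; pass 2: count each word's tag list
--     groups = {}
--     for word, tag in tags:
--         groups[word] = groups.get(word, []) + [tag]
--     return {word: _count(ts) for word, ts in groups.items()}
-- ===== Notes on version B (the rewrite author's own statement) =====
-- stated objective: alternative
-- what changed: A does one scan incrementing counts in a nested dict; B first groups tags into a word -> tag-list index and then, in a separate pass, folds each group's tag list into its count dict.
import Mathlib
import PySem

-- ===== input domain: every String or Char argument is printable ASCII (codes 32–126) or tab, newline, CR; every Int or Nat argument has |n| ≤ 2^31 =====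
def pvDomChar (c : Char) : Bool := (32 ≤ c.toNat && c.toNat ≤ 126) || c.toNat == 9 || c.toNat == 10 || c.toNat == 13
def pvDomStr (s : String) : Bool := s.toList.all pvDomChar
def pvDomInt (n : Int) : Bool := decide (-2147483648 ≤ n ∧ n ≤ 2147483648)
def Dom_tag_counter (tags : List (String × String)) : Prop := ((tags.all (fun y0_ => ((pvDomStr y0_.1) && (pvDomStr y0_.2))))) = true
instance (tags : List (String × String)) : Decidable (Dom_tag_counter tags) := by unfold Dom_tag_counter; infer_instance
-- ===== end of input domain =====

-- B replaces A's single-scan nested-dict increment with two passes: group tags per word, then count each group (objective: alternative decomposition, same cost).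


-- ===== PORT A =====
-- A: one scan, nested dict of counts updated in place; returned dict-of-dicts becomes nested association lists.
def tag_counter (tags : List (String × String)) : List (String × List (String × Int)) :=
  (tags.foldl
    (fun data token =>
      if data.contains token.1 = false then
        -- tag_map = {}; tag_map[token[1]] = 1; data[token[0]] = tag_map
        data.insert token.1 ((PySem.Dict.empty : PySem.Dict String Int).insert token.2 1)
      else
        -- tag_map = data.get(token[0])  (key present in this branch, so .get = lookup)
        let tag_map := data.getD token.1 PySem.Dict.empty
        let tag_map :=
          if tag_map.contains token.2 then tag_map.insert token.2 (tag_map.getD token.2 0 + 1)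
          else tag_map.insert token.2 1
        data.insert token.1 tag_map)
    (PySem.Dict.empty : PySem.Dict String (PySem.Dict String Int))).items.map
    (fun p => (p.1, p.2.items))

-- ===== PORT B =====
-- _count(ts): counts = {}; for t in ts: counts[t] = counts.get(t, 0) + 1
def pvCount (ts : List String) : PySem.Dict String Int :=
  ts.foldl (fun counts t => counts.insert t (counts.getD t 0 + 1)) PySem.Dict.empty

-- B: group tags by word, then count each group.
def tag_counter_alt (tags : List (String × String)) : List (String × List (String × Int)) :=
  (tags.foldl
      (fun groups p => groups.modify p.1 [] (fun l => l ++ [p.2]))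
      (PySem.Dict.empty : PySem.Dict String (List String))).items.map
    (fun p => (p.1, (pvCount p.2).items))

-- ===== PRECONDITION & SPEC =====
def Spec_tag_counter (tags : List (String × String)) (out : List (String × List (String × Int))) : Prop := out = tag_counter_alt tags
instance (tags : List (String × String)) (out : List (String × List (String × Int))) : Decidable (Spec_tag_counter tags out) := by unfold Spec_tag_counter; infer_instance

-- ===== CLAIM (what is proved, stated in full; the proofs are below) =====
def Claim_equal_tag_counter : Prop := ∀ (tags : List (String × String)), Dom_tag_counter tags → Spec_tag_counter tags (tag_counter tags)

-- ===== LEMMAS AND PROOFS =====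

-- A's branchy step collapses to one unconditional insert-of-updated-inner-dict.
def pvStepA (data : PySem.Dict String (PySem.Dict String Int)) (token : String × String) :
    PySem.Dict String (PySem.Dict String Int) :=
  data.insert token.1
    ((data.getD token.1 PySem.Dict.empty).insert token.2
      ((data.getD token.1 PySem.Dict.empty).getD token.2 0 + 1))

theorem pvStepA_eq (data : PySem.Dict String (PySem.Dict String Int)) (token : String × String) :
    (if data.contains token.1 = false then
        data.insert token.1 ((PySem.Dict.empty : PySem.Dict String Int).insert token.2 1)
      else
        let tag_map := data.getD token.1 PySem.Dict.empty
        let tag_map :=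
          if tag_map.contains token.2 then tag_map.insert token.2 (tag_map.getD token.2 0 + 1)
          else tag_map.insert token.2 1
        data.insert token.1 tag_map)
    = pvStepA data token := by
  unfold pvStepA
  by_cases h : data.contains token.1 = false
  · simp [h, PySem.Dict.getD_of_not_contains data _ h]
  · simp only [h]
    by_cases h2 : (data.getD token.1 PySem.Dict.empty).contains token.2 = true
    · simp [h2]
    · simp [h2, PySem.Dict.getD_of_not_contains _ _ (show (data.getD token.1 PySem.Dict.empty).contains token.2 = false by simpa using h2)]

theorem pvFoldA_eq (tags : List (String × String))
    (d : PySem.Dict String (PySem.Dict String Int)) :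
    tags.foldl
      (fun data token =>
        if data.contains token.1 = false then
          data.insert token.1 ((PySem.Dict.empty : PySem.Dict String Int).insert token.2 1)
        else
          let tag_map := data.getD token.1 PySem.Dict.empty
          let tag_map :=
            if tag_map.contains token.2 then tag_map.insert token.2 (tag_map.getD token.2 0 + 1)
            else tag_map.insert token.2 1
          data.insert token.1 tag_map) d
    = tags.foldl pvStepA d := by
  induction tags generalizing d with
  | nil => rfl
  | cons p rest ih => simp only [List.foldl_cons, pvStepA_eq]

-- the inner dict A maintains at word w is the count-fold of w's tags so far
theorem pvGetD_foldA (tags : List (String × String)) (w : String)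
    (d : PySem.Dict String (PySem.Dict String Int)) :
    (tags.foldl pvStepA d).getD w PySem.Dict.empty
      = ((tags.filter (fun p => p.1 == w)).map (·.2)).foldl
          (fun m t => m.insert t (m.getD t 0 + 1)) (d.getD w PySem.Dict.empty) := by
  induction tags generalizing d with
  | nil => rfl
  | cons p rest ih =>
    simp only [List.foldl_cons, ih, List.filter_cons]
    by_cases h : p.1 = w
    · simp [h, pvStepA]
    · simp [h, pvStepA, PySem.Dict.getD_insert, Ne.symm h]

theorem tag_counter_spec' (tags : List (String × String)) :
    tag_counter tags = tag_counter_alt tags := by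
  unfold tag_counter tag_counter_alt
  rw [pvFoldA_eq]
  set DA := tags.foldl pvStepA PySem.Dict.empty with hDA
  set G := tags.foldl
      (fun groups (p : String × String) => groups.modify p.1 [] (fun l => l ++ [p.2]))
      (PySem.Dict.empty : PySem.Dict String (List String)) with hG
  have hkA : DA.keys = PySem.Set.update (PySem.Dict.empty : PySem.Dict String (PySem.Dict String Int)).keys (tags.map (·.1)) := by
    rw [hDA]
    exact PySem.Dict.keys_foldl_insert_key tags (·.1)
      (fun d p => (d.getD p.1 PySem.Dict.empty).insert p.2
        ((d.getD p.1 PySem.Dict.empty).getD p.2 0 + 1)) _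
  have hkG : G.keys = PySem.Set.update (PySem.Dict.empty : PySem.Dict String (List String)).keys (tags.map (·.1)) := by
    rw [hG]
    exact PySem.Dict.keys_foldl_modify_key tags (·.1) [] (fun _ p => (fun l => l ++ [p.2])) _
  have hndA : DA.keys.Nodup := by
    rw [hDA]
    exact PySem.Dict.nodup_keys_foldl_insert_key tags (·.1) _ _ PySem.Dict.nodup_keys_empty
  have hndG : G.keys.Nodup := by
    rw [hG]
    exact PySem.Dict.nodup_keys_foldl_modify_key tags (·.1) [] _ _ PySem.Dict.nodup_keys_empty
  rw [PySem.Dict.items_eq_map_keys DA hndA PySem.Dict.empty,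
      PySem.Dict.items_eq_map_keys G hndG []]
  rw [hkA, hkG]
  simp only [List.map_map]
  apply List.map_congr_left
  intro w _
  simp only [Function.comp]
  congr 1
  -- value at w: A's inner dict = count of w's grouped tag list
  rw [hDA, pvGetD_foldA, hG, PySem.Dict.getD_foldl_modify_append]
  simp [pvCount]

-- ===== VERDICT (by name: the statement is the Claim_ definition above) =====
theorem tag_counter_spec : Claim_equal_tag_counter := by
  intro tags _
  exact tag_counter_spec' tags
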